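-- pv_equiv track=rewrite | github.com/michaelyang-21/esc180 | Lectures/searching_queries.py | n_as_plus_b
-- ===== SOURCE A (Python) =====
-- def n_as_plus_b(s, n):
--     s = "x" + s + "x"
--
--     query = "a" * n + "b"
--
--     while query in s:
--         if s[s.find(query) - 1] != "a" and s[s.find(query) + len(query)] != "b":
--             return True
--         s = s[s.find(query)-1 + len(query):]
--     return False
-- ===== SOURCE B (Python) =====
-- def n_as_plus_b(s, n):
--     # One linear pass: look for a maximal run of exactly n 'a's followed by a
--     # 'b' that is not itself followed by another 'b'.
--     i = 0
--     L = len(s)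
--     while i < L:
--         if s[i] == 'a':
--             j = i
--             while j < L and s[j] == 'a':
--                 j += 1
--             if j - i == n and j < L and s[j] == 'b' and (j + 1 >= L or s[j + 1] != 'b'):
--                 return True
--             i = j + 1
--         else:
--             i += 1
--     return False
-- ===== Notes on version B (the rewrite author's own statement) =====
-- stated objective: simpler
-- what changed: Replaced the loop of repeated substring find + reslice of the 'x'-padded string by one linear scan over s that tracks maximal runs of 'a's and checks run length == n, a following 'b', and no second 'b'.
-- outside the precondition, e.g. on n_as_plus_b('ab', 0): A returns True, B returns False; on n_as_plus_b('bb', 0): A does not finish within the time limit, B returns False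
import Mathlib
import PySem

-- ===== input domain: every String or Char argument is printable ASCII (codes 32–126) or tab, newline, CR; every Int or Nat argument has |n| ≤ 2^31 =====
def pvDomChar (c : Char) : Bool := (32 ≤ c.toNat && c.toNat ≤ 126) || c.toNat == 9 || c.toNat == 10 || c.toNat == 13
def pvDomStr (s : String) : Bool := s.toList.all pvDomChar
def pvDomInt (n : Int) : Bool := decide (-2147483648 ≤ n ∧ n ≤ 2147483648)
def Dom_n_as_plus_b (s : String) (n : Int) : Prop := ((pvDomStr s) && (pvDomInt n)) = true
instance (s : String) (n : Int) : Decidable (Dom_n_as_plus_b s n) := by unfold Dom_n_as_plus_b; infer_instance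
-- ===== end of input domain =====

-- B replaces A's repeated substring-find + reslice loop by one left-to-right scan over
-- maximal runs of 'a's (objective: simpler).

-- ===== PORT A =====
-- A's while loop. `fuel` only makes the recursion total: inside Pre_ (1 ≤ n) every
-- iteration removes at least two characters, so fuel = length of the string never runs
-- out; A itself diverges on some inputs with n ≤ 0, which Pre_ excludes.
def nabLoop (q : List Char) : Nat → List Char → Bool
  | 0, _ => false
  | fuel+1, t =>
    if PySem.Chars.isIn q t then                                -- while query in s
      let f := PySem.Chars.find t q                             -- s.find(query)
      -- s[s.find(query) - 1] != "a" and s[s.find(query) + len(query)] != "b"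
      -- (both indices are in range whenever 1 ≤ n: a match never touches the "x" padding,
      --  so the pyGet? below never yields none inside Pre_)
      if PySem.List.pyGet? t (f - 1) ≠ some 'a' ∧
         PySem.List.pyGet? t (f + q.length) ≠ some 'b' then true
      else nabLoop q fuel (PySem.List.slice t (some (f - 1 + q.length)) none)  -- s = s[f-1+len(query):]
    else false

def n_as_plus_b (s : String) (n : Int) : Bool :=
  let t := 'x' :: s.toList ++ ['x']                             -- s = "x" + s + "x"
  let q := List.replicate n.toNat 'a' ++ ['b']                  -- query = "a"*n + "b"
  nabLoop q t.length t

-- ===== PORT B =====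
-- inner while of B: j advances over the 'a' run ('while j < L and s[j] == "a"')
def nabRun : List Char → Nat
  | [] => 0
  | c :: t => if c = 'a' then nabRun t + 1 else 0

-- outer while of B: on a non-'a' char advance by one; on a run of m+1 'a's test
-- run length == n, next char 'b', the char after that not 'b', else jump past the run
def nabScan (n : Int) : List Char → Bool
  | [] => false
  | c :: t =>
    if c = 'a' then
      let m := nabRun t
      let rest := t.drop m
      if ((m : Int) + 1 = n ∧ rest.head? = some 'b' ∧ (rest.drop 1).head? ≠ some 'b')
      then true
      else nabScan n (rest.drop 1)
    else nabScan n t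
termination_by t => t.length
decreasing_by
  all_goals simp

def n_as_plus_b_alt (s : String) (n : Int) : Bool := nabScan n s.toList

-- ===== PRECONDITION & SPEC =====
-- Pre_ restricts to the function's natural domain n ≥ 1 ("n a's then a b"): for n ≤ 0
-- A's query degenerates to the bare "b", and A then infinite-loops whenever the first
-- 'b' of s is immediately followed by another 'b', and otherwise its reslice discards
-- the left context, returning accidental values (e.g. True on ("ab", 0)).
def Pre_n_as_plus_b (s : String) (n : Int) : Prop := 1 ≤ n
instance (s : String) (n : Int) : Decidable (Pre_n_as_plus_b s n) := by unfold Pre_n_as_plus_b; infer_instance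

def pvWitness_n_as_plus_b : String × Int := ("caab", 2)

def Spec_n_as_plus_b (s : String) (n : Int) (out : Bool) : Prop := out = n_as_plus_b_alt s n
instance (s : String) (n : Int) (out : Bool) : Decidable (Spec_n_as_plus_b s n out) := by unfold Spec_n_as_plus_b; infer_instance

-- ===== CLAIM (what is proved, stated in full; the proofs are below) =====
def Claim_equal_n_as_plus_b : Prop := ∀ (s : String) (n : Int), Dom_n_as_plus_b s n → Pre_n_as_plus_b s n → Spec_n_as_plus_b s n (n_as_plus_b s n)

-- ===== LEMMAS AND PROOFS =====

-- The pattern both programs decide, as a condition on positions of a list w: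
-- at p starts a block of nn 'a's, preceded by start-of-list or a non-'a', followed by a
-- 'b' that is not followed by another 'b'.
def NabAt (nn : Nat) (w : List Char) : Prop :=
  ∃ p : Nat, (∀ j < nn, w[p+j]? = some 'a') ∧ w[p+nn]? = some 'b' ∧
    (p = 0 ∨ w[p-1]? ≠ some 'a') ∧ w[p+nn+1]? ≠ some 'b'

-- the same on A's padded working string (its first char is never 'a', so p ≥ 1)
def NabPad (nn : Nat) (t : List Char) : Prop :=
  ∃ p : Nat, 1 ≤ p ∧ (∀ j < nn, t[p+j]? = some 'a') ∧ t[p+nn]? = some 'b' ∧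
    t[p-1]? ≠ some 'a' ∧ t[p+nn+1]? ≠ some 'b'

lemma nabRun_get (t : List Char) : ∀ i < nabRun t, t[i]? = some 'a' := by
  induction t with
  | nil => simp [nabRun]
  | cons c t ih =>
    intro i hi
    simp only [nabRun] at hi
    by_cases hc : c = 'a'
    · simp [hc] at hi
      cases i with
      | zero => simp [hc]
      | succ i => simpa using ih i (by omega)
    · simp [hc] at hi

lemma nabRun_end (t : List Char) : t[nabRun t]? ≠ some 'a' := by
  induction t with
  | nil => simp
  | cons c t ih =>
    simp only [nabRun]
    by_cases hc : c = 'a'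
    · simpa [hc] using ih
    · simp [hc]

lemma occ_iff (nn p : Nat) (t : List Char) :
    (List.replicate nn 'a' ++ ['b']) <+: t.drop p ↔
      ((∀ j < nn, t[p+j]? = some 'a') ∧ t[p+nn]? = some 'b') := by
  rw [List.prefix_iff_getElem?]
  constructor
  · intro h
    refine ⟨fun j hj => ?_, ?_⟩
    · have := h j (by simp; omega)
      rw [List.getElem?_drop] at this
      rw [this]
      rw [List.getElem_append_left (by simpa using hj), List.getElem_replicate]
    · have := h nn (by simp)
      rw [List.getElem?_drop] at this
      rw [this, List.getElem_append_right (by simp)]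
      simp
  · rintro ⟨ha, hb⟩ i hi
    simp only [List.length_append, List.length_replicate, List.length_cons, List.length_nil] at hi
    rw [List.getElem?_drop]
    by_cases hj : i < nn
    · rw [List.getElem_append_left (by simpa using hj), List.getElem_replicate]
      exact ha i hj
    · have : i = nn := by omega
      subst this
      rw [List.getElem_append_right (by simp)]
      simpa using hb

lemma head?_drop (t : List Char) (m : Nat) : (t.drop m).head? = t[m]? := by
  rw [List.head?_eq_getElem?, List.getElem?_drop]
  simp

lemma nabAt_cons (nn : Nat) (h1 : 1 ≤ nn) (c : Char) (t : List Char) (hc : c ≠ 'a') :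
    NabAt nn (c :: t) ↔ NabAt nn t := by
  constructor
  · rintro ⟨p, ha, hb, hprev, hnext⟩
    cases p with
    | zero =>
      have := ha 0 h1
      simp at this
      exact absurd this hc
    | succ p =>
      refine ⟨p, fun j hj => ?_, ?_, ?_, ?_⟩
      · have := ha j hj
        rw [show p + 1 + j = (p + j) + 1 by omega] at this
        simpa using this
      · have := hb
        rw [show p + 1 + nn = (p + nn) + 1 by omega] at this
        simpa using this
      · cases p with
        | zero => exact Or.inl rfl
        | succ p =>
          rcases hprev with h | h
          · omega
          · refine Or.inr ?_
            rw [show p + 1 + 1 - 1 = (p + 1 - 1) + 1 by omega] at h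
            simpa using h
      · have := hnext
        rw [show p + 1 + nn + 1 = (p + nn + 1) + 1 by omega] at this
        simpa using this
  · rintro ⟨p, ha, hb, hprev, hnext⟩
    refine ⟨p + 1, fun j hj => ?_, ?_, ?_, ?_⟩
    · rw [show p + 1 + j = (p + j) + 1 by omega]
      simpa using ha j hj
    · rw [show p + 1 + nn = (p + nn) + 1 by omega]
      simpa using hb
    · cases p with
      | zero => exact Or.inr (by simpa using hc)
      | succ p =>
        rcases hprev with h | h
        · omega
        · refine Or.inr ?_
          rw [show p + 1 + 1 - 1 = (p + 1 - 1) + 1 by omega]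
          simpa using h
    · rw [show p + 1 + nn + 1 = (p + nn + 1) + 1 by omega]
      simpa using hnext

lemma nabAt_of_run (nn : Nat) (t : List Char) (m : Nat) (hm : m = nabRun t)
    (hCm : (m : Int) + 1 = (nn : Int)) (hCb : (t.drop m).head? = some 'b')
    (hCnb : ((t.drop m).drop 1).head? ≠ some 'b') : NabAt nn ('a' :: t) := by
  have hmn : m + 1 = nn := by exact_mod_cast hCm
  rw [head?_drop] at hCb
  rw [List.drop_drop, head?_drop] at hCnb
  refine ⟨0, fun j hj => ?_, ?_, Or.inl rfl, ?_⟩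
  · cases j with
    | zero => simp
    | succ j =>
      have : j < nabRun t := by omega
      simpa using nabRun_get t j this
  · rw [show 0 + nn = m + 1 by omega]
    simpa using hCb
  · rw [show 0 + nn + 1 = (m + 1) + 1 by omega]
    simpa using hCnb

lemma nabAt_skip_run (nn : Nat) (t : List Char) (m : Nat) (hm : m = nabRun t)
    (hC : ¬ ((m : Int) + 1 = (nn : Int) ∧ (t.drop m).head? = some 'b' ∧
             ((t.drop m).drop 1).head? ≠ some 'b')) :
    NabAt nn ('a' :: t) ↔ NabAt nn (t.drop (m + 1)) := by
  have wa : ∀ i ≤ m, ('a' :: t)[i]? = some 'a' := by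
    intro i hi
    cases i with
    | zero => simp
    | succ i => simpa using nabRun_get t i (by omega)
  have wend : ('a' :: t)[m + 1]? ≠ some 'a' := by
    simpa [hm] using nabRun_end t
  constructor
  · rintro ⟨p, ha, hb, hprev, hnext⟩
    rcases Nat.lt_or_ge p 1 with hp | hp
    · -- p = 0 : the run itself matches, contradicting hC
      have hp0 : p = 0 := by omega
      subst hp0
      exfalso
      apply hC
      have hnm : nn = m + 1 := by
        rcases Nat.lt_or_ge m nn with h' | h'
        · rcases Nat.lt_or_ge nn (m + 2) with h'' | h'' 
          · omega
          · exact absurd (by simpa using ha (m + 1) (by omega)) (by simpa using wend)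
        · have := wa nn (by omega)
          rw [show (nn : Nat) = 0 + nn by omega] at this
          rw [this] at hb
          simp at hb
      refine ⟨by omega, ?_, ?_⟩
      · rw [head?_drop]
        have := hb
        rw [show 0 + nn = m + 1 by omega] at this
        simpa using this
      · rw [List.drop_drop, head?_drop]
        have := hnext
        rw [show 0 + nn + 1 = (m + 1) + 1 by omega] at this
        simpa using this
    · rcases Nat.lt_or_ge p (m + 2) with hp2 | hp2
      · -- 1 ≤ p ≤ m+1 : previous char is inside the run, impossible
        exfalso
        rcases hprev with h | h
        · omega
        · exact h (wa (p - 1) (by omega))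
      · -- p ≥ m+2 : shift into the dropped tail
        refine ⟨p - (m + 2), fun j hj => ?_, ?_, ?_, ?_⟩
        · rw [List.getElem?_drop]
          have := ha j hj
          rw [show p + j = ((m + 1) + (p - (m + 2) + j)) + 1 by omega] at this
          simpa using this
        · rw [List.getElem?_drop]
          have := hb
          rw [show p + nn = ((m + 1) + (p - (m + 2) + nn)) + 1 by omega] at this
          simpa using this
        · rcases Nat.lt_or_ge p (m + 3) with hp3 | hp3
          · exact Or.inl (by omega)
          · refine Or.inr ?_
            rw [List.getElem?_drop]
            rcases hprev with h | h
            · omega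
            · rw [show p - 1 = ((m + 1) + (p - (m + 2) - 1)) + 1 by omega] at h
              simpa using h
        · rw [List.getElem?_drop]
          have := hnext
          rw [show p + nn + 1 = ((m + 1) + (p - (m + 2) + nn + 1)) + 1 by omega] at this
          simpa using this
  · rintro ⟨p, ha, hb, hprev, hnext⟩
    refine ⟨p + (m + 2), fun j hj => ?_, ?_, ?_, ?_⟩
    · have := ha j hj
      rw [List.getElem?_drop] at this
      rw [show p + (m + 2) + j = ((m + 1) + (p + j)) + 1 by omega]
      simpa using this
    · have := hb
      rw [List.getElem?_drop] at this
      rw [show p + (m + 2) + nn = ((m + 1) + (p + nn)) + 1 by omega]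
      simpa using this
    · refine Or.inr ?_
      rcases Nat.eq_zero_or_pos p with hp0 | hp0
      · subst hp0
        rw [show 0 + (m + 2) - 1 = m + 1 by omega]
        exact wend
      · rcases hprev with h | h
        · omega
        · rw [List.getElem?_drop] at h
          rw [show p + (m + 2) - 1 = ((m + 1) + (p - 1)) + 1 by omega]
          simpa using h
    · have := hnext
      rw [List.getElem?_drop] at this
      rw [show p + (m + 2) + nn + 1 = ((m + 1) + (p + nn + 1)) + 1 by omega]
      simpa using this

lemma nabScan_iff (nn : Nat) (h1 : 1 ≤ nn) :
    ∀ w : List Char, (nabScan (nn : Int) w = true ↔ NabAt nn w) := by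
  suffices H : ∀ N (w : List Char), w.length ≤ N → (nabScan (nn : Int) w = true ↔ NabAt nn w) from
    fun w => H w.length w le_rfl
  intro N
  induction N with
  | zero =>
    intro w hw
    have : w = [] := by cases w <;> simp_all
    subst this
    simp only [nabScan]
    constructor
    · simp
    · rintro ⟨p, _, hb, _⟩
      simp at hb
  | succ N IH =>
    intro w hw
    match w with
    | [] =>
      simp only [nabScan]
      constructor
      · simp
      · rintro ⟨p, _, hb, _⟩
        simp at hb
    | c :: t =>
      simp only [nabScan]
      by_cases hc : c = 'a'
      · subst hc
        rw [if_pos rfl]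
        by_cases hC : ((nabRun t : Int) + 1 = (nn : Int) ∧ (t.drop (nabRun t)).head? = some 'b' ∧
              ((t.drop (nabRun t)).drop 1).head? ≠ some 'b')
        · rw [if_pos hC]
          exact iff_of_true rfl (nabAt_of_run nn t (nabRun t) rfl hC.1 hC.2.1 hC.2.2)
        · rw [if_neg hC, List.drop_drop]
          rw [IH (t.drop (nabRun t + 1)) (by simp at hw ⊢; omega)]
          exact (nabAt_skip_run nn t (nabRun t) rfl hC).symm
      · rw [if_neg hc]
        rw [IH t (by simp at hw; omega)]
        exact (nabAt_cons nn h1 c t hc).symm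

lemma getLast?_drop' (t : List Char) (k : Nat) (h : k < t.length) :
    (t.drop k).getLast? = t.getLast? := by
  rw [List.getLast?_eq_getElem?, List.getLast?_eq_getElem?, List.getElem?_drop, List.length_drop]
  congr 1
  omega

lemma nabLoop_iff (nn : Nat) (h1 : 1 ≤ nn) :
    ∀ fuel t, t.length ≤ fuel → t.head? ≠ some 'a' → t.getLast? = some 'x' →
      (nabLoop (List.replicate nn 'a' ++ ['b']) fuel t = true ↔ NabPad nn t) := by
  intro fuel
  induction fuel with
  | zero =>
    intro t hlen hhead hlast
    have : t = [] := by cases t <;> simp_all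
    subst this
    simp at hlast
  | succ fuel IH =>
    intro t hlen hhead hlast
    set q : List Char := List.replicate nn 'a' ++ ['b'] with hq
    have hql : q.length = nn + 1 := by simp [hq]
    simp only [nabLoop]
    by_cases hin : PySem.Chars.isIn q t = true
    · rw [if_pos hin]
      have hfpos : 0 ≤ PySem.Chars.find t q :=
        (PySem.Chars.find_nonneg_iff t q).mpr ((PySem.Chars.isIn_iff_infix q t).mp hin)
      obtain ⟨hOcc, hMin⟩ := PySem.Chars.find_spec hfpos
      set F : Nat := (PySem.Chars.find t q).toNat with hF
      have hf : PySem.Chars.find t q = (F : Int) := by omega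
      obtain ⟨hA, hB⟩ := (occ_iff nn F t).mp hOcc
      have hF1 : 1 ≤ F := by
        rcases Nat.eq_zero_or_pos F with h0 | h0
        · exfalso
          apply hhead
          rw [List.head?_eq_getElem?]
          simpa [h0] using hA 0 h1
        · exact h0
      have hFlt : F + nn < t.length := by
        have := hB
        rw [List.getElem?_eq_some_iff] at this
        exact this.1
      have e1 : PySem.List.pyGet? t (PySem.Chars.find t q - 1) = t[F-1]? := by
        rw [show PySem.Chars.find t q - 1 = ((F - 1 : Nat) : Int) by omega]
        exact PySem.List.pyGet?_natCast t (F-1)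
      have e2 : PySem.List.pyGet? t (PySem.Chars.find t q + q.length) = t[F+nn+1]? := by
        rw [show PySem.Chars.find t q + (q.length : Int) = ((F + nn + 1 : Nat) : Int) by
              rw [hql]; omega]
        exact PySem.List.pyGet?_natCast t (F+nn+1)
      by_cases hcond : (t[F-1]? ≠ some 'a' ∧ t[F+nn+1]? ≠ some 'b')
      · rw [if_pos (by rw [e1, e2]; exact hcond)]
        exact iff_of_true rfl ⟨F, hF1, hA, hB, hcond.1, hcond.2⟩
      · rw [if_neg (by rw [e1, e2]; exact hcond)]
        have eslice : PySem.List.slice t (some (PySem.Chars.find t q - 1 + q.length)) none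
            = t.drop (F + nn) := by
          rw [show PySem.Chars.find t q - 1 + (q.length : Int) = ((F + nn : Nat) : Int) by
                rw [hql]; omega]
          exact PySem.List.slice_from_natCast t (F+nn)
        rw [eslice]
        rw [IH (t.drop (F + nn)) (by simp; omega)
              (by rw [head?_drop t (F+nn), hB]; simp)
              (by rw [getLast?_drop' t (F+nn) (by omega)]; exact hlast)]
        -- NabPad (t.drop (F+nn)) ↔ NabPad t
        have hcond' : t[F-1]? = some 'a' ∨ t[F+nn+1]? = some 'b' := by
          rcases Decidable.em (t[F-1]? = some 'a') with h' | h'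
          · exact Or.inl h'
          · right
            by_contra h''
            exact hcond ⟨h', h''⟩
        constructor
        · rintro ⟨p, hp1, pa, pb, pprev, pnext⟩
          refine ⟨p + (F + nn), by omega, fun j hj => ?_, ?_, ?_, ?_⟩
          · have := pa j hj
            rw [List.getElem?_drop] at this
            rw [show p + (F + nn) + j = (F + nn) + (p + j) by omega]
            exact this
          · have := pb
            rw [List.getElem?_drop] at this
            rw [show p + (F + nn) + nn = (F + nn) + (p + nn) by omega]
            exact this
          · have := pprev
            rw [List.getElem?_drop] at this
            rw [show p + (F + nn) - 1 = (F + nn) + (p - 1) by omega]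
            exact this
          · have := pnext
            rw [List.getElem?_drop] at this
            rw [show p + (F + nn) + nn + 1 = (F + nn) + (p + nn + 1) by omega]
            exact this
        · rintro ⟨p, hp1, pa, pb, pprev, pnext⟩
          -- the witness must lie strictly beyond the failed first match
          have hocc : q <+: t.drop p := (occ_iff nn p t).mpr ⟨pa, pb⟩
          have hpF : F ≤ p := by
            by_contra h
            exact hMin p (by omega) hocc
          have hpF2 : p ≠ F := by
            intro h
            subst h
            rcases hcond' with h' | h'
            · exact pprev h'
            · exact pnext h'
          have hpF3 : F + nn + 1 ≤ p := by
            by_contra h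
            have hj : F + nn - p < nn := by omega
            have := pa (F + nn - p) hj
            rw [show p + (F + nn - p) = F + nn by omega] at this
            rw [this] at hB
            simp at hB
          refine ⟨p - (F + nn), by omega, fun j hj => ?_, ?_, ?_, ?_⟩
          · rw [List.getElem?_drop, show (F + nn) + (p - (F + nn) + j) = p + j by omega]
            exact pa j hj
          · rw [List.getElem?_drop, show (F + nn) + (p - (F + nn) + nn) = p + nn by omega]
            exact pb
          · rw [List.getElem?_drop, show (F + nn) + (p - (F + nn) - 1) = p - 1 by omega]
            exact pprev
          · rw [List.getElem?_drop, show (F + nn) + (p - (F + nn) + nn + 1) = p + nn + 1 by omega]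
            exact pnext
    · rw [if_neg hin]
      refine iff_of_false (by simp) ?_
      rintro ⟨p, _, pa, pb, _⟩
      exact hin ((PySem.Chars.exists_prefix_drop_iff_isIn q t).mp
        ⟨p, (occ_iff nn p t).mpr ⟨pa, pb⟩⟩)

lemma pad_get (w : List Char) (i : Nat) :
    ('x' :: w ++ ['x'])[i]? =
      if i = 0 then some 'x' else if i ≤ w.length then w[i-1]?
      else if i = w.length + 1 then some 'x' else none := by
  cases i with
  | zero => simp
  | succ i =>
    simp only [List.cons_append, List.getElem?_cons_succ]
    rcases lt_trichotomy i w.length with h | h | h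
    · rw [List.getElem?_append_left h]
      simp; omega
    · subst h
      rw [List.getElem?_append_right (le_refl _)]
      simp
    · rw [List.getElem?_append_right (by omega)]
      have h2 : ¬ (i + 1 ≤ w.length) := by omega
      simp only [if_neg (by omega : ¬ i + 1 = 0), if_neg h2]
      rcases Nat.lt_or_ge (i - w.length) 1 with h3 | h3
      · have h4 : i - w.length = 0 := by omega
        omega
      · rw [List.getElem?_eq_none (by simp; omega)]
        split <;> [omega; rfl]

lemma pad_mid (w : List Char) (i : Nat) (h1 : 1 ≤ i) (h2 : i ≤ w.length) :
    ('x' :: w ++ ['x'])[i]? = w[i-1]? := by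
  rw [pad_get, if_neg (by omega), if_pos h2]

lemma pad_end (w : List Char) : ('x' :: w ++ ['x'])[w.length + 1]? = some 'x' := by
  rw [pad_get, if_neg (by omega), if_neg (by omega), if_pos rfl]

lemma pad_iff (nn : Nat) (h1 : 1 ≤ nn) (w : List Char) :
    NabPad nn ('x' :: w ++ ['x']) ↔ NabAt nn w := by
  constructor
  · rintro ⟨p, hp1, ha, hb, hprev, hnext⟩
    have hlt : p + nn < ('x' :: w ++ ['x']).length := (List.getElem?_eq_some_iff.mp hb).1
    have hble : p + nn ≤ w.length := by
      simp only [List.length_cons, List.length_append, List.length_cons, List.length_nil] at hlt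
      rcases Nat.lt_or_ge (p + nn) (w.length + 1) with h | h
      · omega
      · exfalso
        have : p + nn = w.length + 1 := by omega
        rw [this, pad_end] at hb
        simp at hb
    rw [pad_mid w _ (by omega) hble] at hb
    refine ⟨p - 1, fun j hj => ?_, ?_, ?_, ?_⟩
    · have := ha j hj
      rw [pad_mid w _ (by omega) (by omega)] at this
      rw [show p - 1 + j = p + j - 1 by omega]
      exact this
    · rw [show p - 1 + nn = p + nn - 1 by omega]
      exact hb
    · rcases Nat.lt_or_ge p 2 with hp2 | hp2
      · exact Or.inl (by omega)
      · refine Or.inr ?_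
        rw [pad_mid w _ (by omega) (by omega)] at hprev
        exact hprev
    · rcases Nat.lt_or_ge (p + nn) w.length with h | h
      · rw [pad_mid w _ (by omega) (by omega)] at hnext
        rw [show p - 1 + nn + 1 = p + nn + 1 - 1 by omega]
        exact hnext
      · have : p + nn = w.length := by omega
        rw [List.getElem?_eq_none (by omega)]
        simp
  · rintro ⟨p, ha, hb, hprev, hnext⟩
    have hblt : p + nn < w.length := (List.getElem?_eq_some_iff.mp hb).1
    refine ⟨p + 1, by omega, fun j hj => ?_, ?_, ?_, ?_⟩
    · rw [pad_mid w _ (by omega) (by omega), show p + 1 + j - 1 = p + j by omega]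
      exact ha j hj
    · rw [pad_mid w _ (by omega) (by omega), show p + 1 + nn - 1 = p + nn by omega]
      exact hb
    · rcases Nat.eq_zero_or_pos p with hp0 | hp0
      · subst hp0
        rw [pad_get]
        simp
      · rw [pad_mid w _ (by omega) (by omega), show p + 1 - 1 - 1 = p - 1 by omega]
        rcases hprev with h | h
        · omega
        · exact h
    · rcases Nat.lt_or_ge (p + nn + 1) w.length with h | h
      · rw [pad_mid w _ (by omega) (by omega),
          show p + 1 + nn + 1 - 1 = p + nn + 1 by omega]
        exact hnext
      · have : p + 1 + nn + 1 = w.length + 1 := by omega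
        rw [this, pad_end]
        simp

-- ===== VERDICT (by name: the statement is the Claim_ definition above) =====
theorem n_as_plus_b_spec : Claim_equal_n_as_plus_b := by
  intro s n _ hn
  have hn' : (1 : Int) ≤ n := hn
  have hnn : n = ((n.toNat : Nat) : Int) := (Int.toNat_of_nonneg (by omega)).symm
  have h1 : 1 ≤ n.toNat := by omega
  unfold Spec_n_as_plus_b
  show nabLoop (List.replicate n.toNat 'a' ++ ['b']) ('x' :: s.toList ++ ['x']).length ('x' :: s.toList ++ ['x']) = nabScan n s.toList
  rw [Bool.eq_iff_iff,
    nabLoop_iff n.toNat h1 _ _ (le_refl _) (by simp) (by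
      rw [show ('x' :: s.toList ++ ['x']) = ('x' :: s.toList) ++ ['x'] by simp]
      exact List.getLast?_concat),
    pad_iff n.toNat h1, hnn, nabScan_iff n.toNat h1, Int.toNat_natCast]
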